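-- pv_equiv track=rewrite | github.com/ruke47/advent-of-code-2020 | 20/2.py | arr_to_int
-- ===== SOURCE A (Python) =====
-- def arr_to_int(line):
--     width = len(line)
--     val = 0
--     val_i = 0
--     for i, char in enumerate(line):
--         val <<= 1
--         if char == "#":
--             val += 1
--             val_i += 1<<i
--     return val, val_i
-- ===== SOURCE B (Python) =====
-- def arr_to_int(line):
--     bits = [i for i, c in enumerate(line) if c == '#']
--     n = len(line)
--     return (sum(1 << (n - 1 - i) for i in bits), sum(1 << i for i in bits))
-- ===== Notes on version B (the rewrite author's own statement) =====
-- stated objective: alternative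
-- what changed: Replaces the shift-and-add accumulator loop (val <<= 1 each step, 1<<i added on hit) by collecting the set-bit positions once and summing explicit positional weights 1<<(n-1-i) and 1<<i.
import Mathlib
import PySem

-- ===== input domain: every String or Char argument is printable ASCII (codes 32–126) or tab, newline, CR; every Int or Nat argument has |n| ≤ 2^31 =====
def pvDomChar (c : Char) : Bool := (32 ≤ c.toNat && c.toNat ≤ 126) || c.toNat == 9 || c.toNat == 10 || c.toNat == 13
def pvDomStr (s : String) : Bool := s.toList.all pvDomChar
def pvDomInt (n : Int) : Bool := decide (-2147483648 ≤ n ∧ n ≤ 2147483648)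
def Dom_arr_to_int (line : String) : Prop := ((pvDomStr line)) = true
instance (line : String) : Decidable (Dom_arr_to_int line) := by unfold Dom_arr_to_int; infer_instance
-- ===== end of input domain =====

-- B replaces A's shift-and-add accumulator loop by collecting set-bit positions and
-- summing explicit positional weights (alternative decomposition, same cost).

-- ===== PORT A =====
-- enumerate indices are ≥ 0, so '1 << i' is ported as '(1 : Int) <<< i.toNat' (exact there)
def arr_to_int (line : String) : Int × Int :=
  (PySem.List.enumerate line.toList 0).foldl
    (fun (st : Int × Int) (p : Int × Char) =>
      let val := st.1 <<< 1
      if p.2 = '#' then (val + 1, st.2 + ((1 : Int) <<< p.1.toNat)) else (val, st.2))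
    (0, 0)

-- ===== PORT B =====
-- indices i satisfy 0 ≤ i < n, so the shift amounts 'n - 1 - i' and 'i' are ≥ 0; .toNat is exact
def arr_to_int_alt (line : String) : Int × Int :=
  let bits := ((PySem.List.enumerate line.toList 0).filter (fun p => p.2 == '#')).map Prod.fst
  let n : Int := PySem.Str.len line
  ((bits.map (fun i => (1 : Int) <<< (n - 1 - i).toNat)).sum,
   (bits.map (fun i => (1 : Int) <<< i.toNat)).sum)

-- ===== PRECONDITION & SPEC =====
def Spec_arr_to_int (line : String) (out : Int × Int) : Prop := out = arr_to_int_alt line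
instance (line : String) (out : Int × Int) : Decidable (Spec_arr_to_int line out) := by unfold Spec_arr_to_int; infer_instance

-- ===== CLAIM (what is proved, stated in full; the proofs are below) =====
def Claim_equal_arr_to_int : Prop := ∀ (line : String), Dom_arr_to_int line → Spec_arr_to_int line (arr_to_int line)

-- ===== LEMMAS AND PROOFS =====

theorem pvShl_one (a : Int) : a <<< (1 : Int) = a * 2 := by
  rw [show (1 : Int) = ((1 : Nat) : Int) by norm_num, Int.shiftLeft_natCast_right,
    Int.shiftLeft_eq']
  norm_num

theorem pvShl_pow (a : Int) (k : Nat) : a <<< (k : Int) = a * 2 ^ k := by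
  rw [Int.shiftLeft_natCast_right, Int.shiftLeft_eq']; push_cast; ring

theorem pvShl_pow' (a : Int) (k : Nat) : a <<< k = a * 2 ^ k := by
  rw [Int.shiftLeft_eq']; push_cast; ring

-- forward value: head bit weighs 2^(length of tail)
def pvFst : List Char → Int
  | [] => 0
  | c :: cs => (if c = '#' then 2 ^ cs.length else 0) + pvFst cs

-- reverse value with start index s
def pvSnd : List Char → Int → Int
  | [], _ => 0
  | c :: cs, s => (if c = '#' then 2 ^ s.toNat else 0) + pvSnd cs (s + 1)

theorem pvA_fold (cs : List Char) : ∀ (s v w : Int), 0 ≤ s →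
    (PySem.List.enumerate cs s).foldl
      (fun (st : Int × Int) (p : Int × Char) =>
        let val := st.1 <<< 1
        if p.2 = '#' then (val + 1, st.2 + ((1 : Int) <<< p.1.toNat)) else (val, st.2))
      (v, w)
    = (v * 2 ^ cs.length + pvFst cs, w + pvSnd cs s) := by
  induction cs with
  | nil => intro s v w _; simp [PySem.List.enumerate_nil, pvFst, pvSnd]
  | cons c cs ih =>
    intro s v w hs
    rw [PySem.List.enumerate_cons, List.foldl_cons]
    by_cases hc : c = '#' <;>
      simp only [hc, reduceIte] <;>
      rw [ih (s + 1) _ _ (by omega)] <;>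
      simp [pvFst, pvSnd, hc, pvShl_one, pvShl_pow', pow_succ, Prod.ext_iff] <;>
      first
        | (constructor <;> ring)
        | ring

theorem pvB_snd (cs : List Char) : ∀ (s : Int), 0 ≤ s →
    ((((PySem.List.enumerate cs s).filter (fun p => p.2 == '#')).map Prod.fst).map
      (fun i => (1 : Int) <<< i.toNat)).sum = pvSnd cs s := by
  induction cs with
  | nil => intro s _; simp [PySem.List.enumerate_nil, pvSnd]
  | cons c cs ih =>
    intro s hs
    rw [PySem.List.enumerate_cons]
    by_cases hc : c = '#'
    · simp only [List.filter_cons, hc, beq_self_eq_true, if_true, List.map_cons, List.sum_cons]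
      rw [pvShl_pow, ih (s + 1) (by omega)]
      simp [pvSnd]
    · have : ((s, c).2 == '#') = false := by simp [hc]
      simp only [List.filter_cons, this, Bool.false_eq_true, if_false]
      rw [ih (s + 1) (by omega)]
      simp [pvSnd, hc]

theorem pvB_fst (cs : List Char) : ∀ (s n : Int), 0 ≤ s → s + cs.length = n →
    ((((PySem.List.enumerate cs s).filter (fun p => p.2 == '#')).map Prod.fst).map
      (fun i => (1 : Int) <<< (n - 1 - i).toNat)).sum = pvFst cs := by
  induction cs with
  | nil => intro s n _ _; simp [PySem.List.enumerate_nil, pvFst]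
  | cons c cs ih =>
    intro s n hs hn
    rw [PySem.List.enumerate_cons]
    have hlen : (n - 1 - s).toNat = cs.length := by
      simp only [List.length_cons] at hn; push_cast at hn; omega
    by_cases hc : c = '#'
    · simp only [List.filter_cons, hc, beq_self_eq_true, if_true, List.map_cons, List.sum_cons]
      rw [pvShl_pow', ih (s + 1) n (by omega) (by simp at hn; omega)]
      simp [pvFst, hlen]
    · have : ((s, c).2 == '#') = false := by simp [hc]
      simp only [List.filter_cons, this, Bool.false_eq_true, if_false]
      rw [ih (s + 1) n (by omega) (by simp at hn; omega)]
      simp [pvFst, hc]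

-- ===== VERDICT (by name: the statement is the Claim_ definition above) =====
theorem arr_to_int_spec : Claim_equal_arr_to_int := by
  intro line _
  unfold Spec_arr_to_int arr_to_int
  simp only [arr_to_int_alt]
  rw [pvA_fold line.toList 0 0 0 le_rfl,
      pvB_snd line.toList 0 le_rfl,
      pvB_fst line.toList 0 (PySem.Str.len line) le_rfl (by simp [PySem.Str.len])]
  simp
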